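-- pv_equiv track=rewrite | github.com/kvesik/dissertation | scripts/generate_tableaux_otsoft_stress.py | Parse_violations
-- ===== SOURCE A (Python) =====
-- def Parse_violations(candidate):
--     num_violns = 0
--     currently_in_a_foot = False
--
--     for char in candidate:
--         if char == "(":
--             currently_in_a_foot = True
--         elif char == ")":
--             currently_in_a_foot = False
--         elif (not currently_in_a_foot) and (char in ["H", "L"]):
--             num_violns += 1
--
--     return num_violns
-- ===== SOURCE B (Python) =====
-- def Parse_violations(candidate):
--     # Skip-scan: count H/L in the chunk before the next opening paren, jump past the
--     # matching ')' (an unmatched '(' swallows the rest), and recurse.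
--     i = candidate.find("(")
--     if i == -1:
--         return candidate.count("H") + candidate.count("L")
--     head = candidate[:i]
--     j = candidate.find(")", i + 1)
--     rest = "" if j == -1 else candidate[j + 1:]
--     return head.count("H") + head.count("L") + Parse_violations(rest)
-- ===== Notes on version B (the rewrite author's own statement) =====
-- stated objective: faster
-- what changed: Replaced the per-character boolean state machine with a recursive skip-scan: locate the next opening parenthesis with str.find, tally H/L in the chunk before it with str.count, jump past the following closing parenthesis (an unmatched opener swallows the rest) and recurse on the remainder.
import Mathlib
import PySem

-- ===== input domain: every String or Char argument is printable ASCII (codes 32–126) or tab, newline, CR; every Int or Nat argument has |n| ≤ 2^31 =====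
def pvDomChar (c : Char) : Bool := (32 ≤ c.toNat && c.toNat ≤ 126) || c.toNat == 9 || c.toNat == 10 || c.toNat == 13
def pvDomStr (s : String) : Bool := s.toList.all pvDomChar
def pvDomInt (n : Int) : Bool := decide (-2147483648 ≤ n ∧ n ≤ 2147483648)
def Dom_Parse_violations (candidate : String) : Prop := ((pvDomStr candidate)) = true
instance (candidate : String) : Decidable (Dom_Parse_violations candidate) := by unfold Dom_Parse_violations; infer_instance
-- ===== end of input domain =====

-- B replaces A's per-character boolean state machine by a recursive skip-scan over whole
-- chunks (find the next opening parenthesis, count H/L before it, jump past the next closing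
-- parenthesis and recurse); a timing run measured B faster by a constant factor.

-- ===== PORT A =====
-- A's loop body: the state is (num_violns, currently_in_a_foot)
def pvStep (st : Int × Bool) (c : Char) : Int × Bool :=
  if c = '(' then (st.1, true)
  else if c = ')' then (st.1, false)
  else if !st.2 && (c == 'H' || c == 'L') then (st.1 + 1, st.2)
  else st

def Parse_violations (candidate : String) : Int :=
  (candidate.toList.foldl pvStep (0, false)).1

-- ===== PORT B =====
-- Source B's recursion, fuel only to make the same computation total
-- (each call recurses on a strictly shorter remainder, so length + 1 fuel is never exhausted)
def pvAltGo (fuel : Nat) (cs : List Char) : Int :=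
  match fuel with
  | 0 => 0
  | fuel + 1 =>
    let i := PySem.Chars.find cs ['(']
    if i = -1 then
      (PySem.Chars.count cs ['H'] : Int) + (PySem.Chars.count cs ['L'] : Int)
    else
      let head := PySem.Chars.slice cs none (some i)
      let j := PySem.Chars.findFrom cs [')'] (i + 1) none
      let rest := if j = -1 then ([] : List Char) else PySem.Chars.slice cs (some (j + 1)) none
      (PySem.Chars.count head ['H'] : Int) + (PySem.Chars.count head ['L'] : Int) + pvAltGo fuel rest

def Parse_violations_alt (candidate : String) : Int :=
  pvAltGo (candidate.toList.length + 1) candidate.toList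

-- ===== PRECONDITION & SPEC =====
def Spec_Parse_violations (candidate : String) (out : Int) : Prop := out = Parse_violations_alt candidate
instance (candidate : String) (out : Int) : Decidable (Spec_Parse_violations candidate out) := by unfold Spec_Parse_violations; infer_instance

-- ===== CLAIM (what is proved, stated in full; the proofs are below) =====
def Claim_equal_Parse_violations : Prop := ∀ (candidate : String), Dom_Parse_violations candidate → Spec_Parse_violations candidate (Parse_violations candidate)

-- ===== LEMMAS AND PROOFS =====

lemma pv_count_go_single (c : Char) : ∀ (l : List Char) (fuel acc : Nat), l.length ≤ fuel →
    PySem.Chars.count.go [c] fuel l acc = acc + l.count c := by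
  intro l
  induction l with
  | nil => intro fuel acc _; cases fuel <;> simp [PySem.Chars.count.go]
  | cons d t ih =>
    intro fuel acc h
    cases fuel with
    | zero => simp at h
    | succ f =>
      have ht : t.length ≤ f := by simpa using h
      by_cases hd : c = d
      · subst hd
        simp [PySem.Chars.count.go, List.isPrefixOf, ih f (acc + 1) ht]
        omega
      · simp [PySem.Chars.count.go, List.isPrefixOf, hd, ih f acc ht, List.count_cons]
        exact fun e => hd e.symm

lemma pv_count_single (c : Char) (l : List Char) : PySem.Chars.count l [c] = l.count c := by
  simp [PySem.Chars.count, pv_count_go_single c l l.length 0 le_rfl]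

lemma pv_find_go_single_not_mem (c : Char) : ∀ (l : List Char) (k : Nat), c ∉ l →
    PySem.Chars.find.go [c] l k = -1 := by
  intro l
  induction l with
  | nil => intro k _; simp [PySem.Chars.find.go]
  | cons d t ih =>
    intro k h
    simp at h
    simp [PySem.Chars.find.go, List.isPrefixOf, h.1, ih (k + 1) h.2]

lemma pv_find_go_single_split (c : Char) : ∀ (pre : List Char) (suf : List Char) (k : Nat), c ∉ pre →
    PySem.Chars.find.go [c] (pre ++ c :: suf) k = ((k + pre.length : Nat) : Int) := by
  intro pre
  induction pre with
  | nil => intro suf k _; simp [PySem.Chars.find.go, List.isPrefixOf]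
  | cons d t ih =>
    intro suf k h
    simp at h
    simp [PySem.Chars.find.go, List.isPrefixOf, h.1, ih suf (k + 1) h.2]
    omega

lemma pv_first_split (c : Char) : ∀ (l : List Char), c ∈ l → ∃ pre suf, c ∉ pre ∧ l = pre ++ c :: suf := by
  intro l
  induction l with
  | nil => intro h; simp at h
  | cons d t ih =>
    intro h
    by_cases hd : d = c
    · exact ⟨[], t, by simp, by simp [hd]⟩
    · obtain ⟨pre, suf, h1, h2⟩ := ih (by
        rcases List.mem_cons.mp h with h' | h'
        · exact absurd h'.symm hd
        · exact h')
      refine ⟨d :: pre, suf, ?_, by simp [h2]⟩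
      simp [h1]
      exact fun e => hd e.symm

lemma pv_foldl_outside : ∀ (l : List Char) (n : Int), '(' ∉ l →
    l.foldl pvStep (n, false) = (n + l.count 'H' + l.count 'L', false) := by
  intro l
  induction l with
  | nil => intro n _; simp
  | cons d t ih =>
    intro n h
    simp at h
    by_cases hp : d = ')'
    · subst hp
      simp [pvStep, ih n h.2, List.count_cons]
    · by_cases hH : d = 'H'
      · subst hH
        simp [pvStep, ih (n + 1) h.2, List.count_cons]
        ring
      · by_cases hL : d = 'L'
        · subst hL
          simp [pvStep, ih (n + 1) h.2, List.count_cons]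
          ring
        · have hop : d ≠ '(' := fun e => h.1 e.symm
          simp [pvStep, hop, hp, hH, hL, ih n h.2,
            fun e : 'H' = d => hH e.symm, fun e : 'L' = d => hL e.symm]

lemma pv_foldl_inside : ∀ (l : List Char) (n : Int), ')' ∉ l →
    l.foldl pvStep (n, true) = (n, true) := by
  intro l
  induction l with
  | nil => intro n _; simp
  | cons d t ih =>
    intro n h
    simp at h
    by_cases hp : d = '('
    · simp [pvStep, hp, ih n h.2]
    · have hcp : d ≠ ')' := fun e => h.1 e.symm
      simp [pvStep, hp, hcp, ih n h.2]

lemma pv_foldl_shift : ∀ (l : List Char) (n : Int) (b : Bool),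
    l.foldl pvStep (n, b) = (n + (l.foldl pvStep (0, b)).1, (l.foldl pvStep (0, b)).2) := by
  intro l
  induction l with
  | nil => intro n b; simp
  | cons d t ih =>
    intro n b
    have hs : pvStep (n, b) d = (n + (pvStep (0, b) d).1, (pvStep (0, b) d).2) := by
      simp [pvStep]; split_ifs <;> simp
    simp only [List.foldl_cons, hs]
    rw [ih (n + (pvStep (0, b) d).1) (pvStep (0, b) d).2]
    rw [show pvStep (0, b) d = ((pvStep (0, b) d).1, (pvStep (0, b) d).2) from rfl]
    rw [ih (pvStep (0, b) d).1 (pvStep (0, b) d).2]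
    simp [add_assoc]

lemma pv_altGo_nil (f : Nat) (hf : 0 < f) : pvAltGo f [] = 0 := by
  cases f with
  | zero => omega
  | succ f' => simp [pvAltGo, PySem.Chars.find, PySem.Chars.find.go, PySem.Chars.count]

lemma pv_main : ∀ (fuel : Nat) (l : List Char), l.length < fuel →
    (l.foldl pvStep (0, false)).1 = pvAltGo fuel l := by
  intro fuel
  induction fuel with
  | zero => intro l h; exact absurd h (Nat.not_lt_zero _)
  | succ f ih =>
    intro l hlen
    by_cases hmem : '(' ∈ l
    · obtain ⟨pre, suf, hnp, rfl⟩ := pv_first_split '(' l hmem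
      have hfind : PySem.Chars.find (pre ++ '(' :: suf) ['('] = ((pre.length : Nat) : Int) := by
        simpa [PySem.Chars.find] using pv_find_go_single_split '(' pre suf 0 hnp
      have hi : ((pre.length : Nat) : Int) ≠ -1 := by omega
      have hhead : PySem.Chars.slice (pre ++ '(' :: suf) none (some ((pre.length : Nat) : Int)) = pre := by
        simp [PySem.List.slice_to_natCast]
      have hk1 : pre.length + 1 ≤ (pre ++ '(' :: suf).length := by simp
      have hdrop : (pre ++ '(' :: suf).drop (pre.length + 1) = suf := by
        rw [show pre ++ '(' :: suf = (pre ++ ['(']) ++ suf by simp]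
        rw [show pre.length + 1 = (pre ++ ['(']).length by simp]
        exact List.drop_left
      have hcast : ((pre.length : Nat) : Int) + 1 = ((pre.length + 1 : Nat) : Int) := by push_cast; ring
      have hff := PySem.Chars.findFrom_natCast (pre ++ '(' :: suf) [')'] (pre.length + 1) hk1
      rw [hdrop] at hff
      by_cases hrp : ')' ∈ suf
      · obtain ⟨mid, rest2, hnm, rfl⟩ := pv_first_split ')' suf hrp
        have hfind2 : PySem.Chars.find (mid ++ ')' :: rest2) [')'] = ((mid.length : Nat) : Int) := by
          simpa [PySem.Chars.find] using pv_find_go_single_split ')' mid rest2 0 hnm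
        rw [hfind2] at hff
        have hne2 : ((mid.length : Nat) : Int) ≠ -1 := by omega
        simp only [hne2, if_false] at hff
        have hj : ((pre.length + 1 : Nat) : Int) + ((mid.length : Nat) : Int)
            = ((pre.length + mid.length + 1 : Nat) : Int) := by push_cast; ring
        have hjne : ((pre.length + mid.length + 1 : Nat) : Int) ≠ -1 := by omega
        have hrest : PySem.Chars.slice (pre ++ '(' :: (mid ++ ')' :: rest2))
            (some (((pre.length + mid.length + 1 : Nat) : Int) + 1)) none = rest2 := by
          rw [show (((pre.length + mid.length + 1 : Nat) : Int) + 1) = ((pre.length + mid.length + 2 : Nat) : Int) by push_cast; ring]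
          rw [PySem.Chars.slice_eq_listSlice, PySem.List.slice_from_natCast]
          rw [show pre ++ '(' :: (mid ++ ')' :: rest2) = (pre ++ '(' :: (mid ++ [')'])) ++ rest2 by simp]
          rw [show pre.length + mid.length + 2 = (pre ++ '(' :: (mid ++ [')'])).length by simp; omega]
          exact List.drop_left
        have hlen2 : rest2.length < f := by simp at hlen; omega
        -- A side
        have hA : ((pre ++ '(' :: (mid ++ ')' :: rest2)).foldl pvStep (0, false)).1
            = ((pre.count 'H' : Int) + (pre.count 'L' : Int)) + (rest2.foldl pvStep (0, false)).1 := by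
          rw [show (pre ++ '(' :: (mid ++ ')' :: rest2)) = ((((pre ++ ['(']) ++ mid) ++ [')']) ++ rest2) by simp]
          simp only [List.foldl_append, List.foldl_cons, List.foldl_nil]
          rw [pv_foldl_outside pre 0 hnp]
          rw [show pvStep ((0 : Int) + pre.count 'H' + pre.count 'L', false) '(' = ((pre.count 'H' : Int) + pre.count 'L', true) by simp [pvStep]]
          rw [pv_foldl_inside mid _ hnm]
          rw [show pvStep ((pre.count 'H' : Int) + pre.count 'L', true) ')' = ((pre.count 'H' : Int) + pre.count 'L', false) by simp [pvStep]]
          rw [pv_foldl_shift rest2 _ false]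
        rw [hA, ih rest2 hlen2]
        simp only [pvAltGo, hfind, hi, if_false, hcast, hff, hj, hjne, hhead]
        rw [hrest]
        simp [pv_count_single]
      · have hfind2 : PySem.Chars.find suf [')'] = -1 := by
          simpa [PySem.Chars.find] using pv_find_go_single_not_mem ')' suf 0 hrp
        rw [hfind2] at hff
        simp only [if_pos rfl] at hff
        have hA : ((pre ++ '(' :: suf).foldl pvStep (0, false)).1
            = (pre.count 'H' : Int) + (pre.count 'L' : Int) := by
          rw [show (pre ++ '(' :: suf) = ((pre ++ ['(']) ++ suf) by simp]
          simp only [List.foldl_append, List.foldl_cons, List.foldl_nil]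
          rw [pv_foldl_outside pre 0 hnp]
          rw [show pvStep ((0 : Int) + pre.count 'H' + pre.count 'L', false) '(' = ((pre.count 'H' : Int) + pre.count 'L', true) by simp [pvStep]]
          rw [pv_foldl_inside suf _ hrp]
        rw [hA]
        simp only [pvAltGo, hfind, hi, if_false, hcast, hff, if_pos rfl, hhead]
        have hf0 : 0 < f := by simp at hlen; omega
        simp [pv_count_single, pv_altGo_nil f hf0]
    · have hfind : PySem.Chars.find l ['('] = -1 := by
        simpa [PySem.Chars.find] using pv_find_go_single_not_mem '(' l 0 hmem
      rw [pv_foldl_outside l 0 hmem]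
      simp [pvAltGo, hfind, pv_count_single]

-- ===== VERDICT (by name: the statement is the Claim_ definition above) =====
theorem Parse_violations_spec : Claim_equal_Parse_violations := by
  intro s _
  unfold Spec_Parse_violations Parse_violations Parse_violations_alt
  exact pv_main _ _ (Nat.lt_succ_self _)
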